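-- pv_equiv track=rewrite | github.com/soupmaruchan/Marianas_Programacion_II | Arte_ASCII/grafico.py | generar_cuadrado
-- ===== SOURCE A (Python) =====
-- RESET = "\033[0m"
--
-- PASTEL_AZUL = "\033[38;5;153m"
--
-- def generar_cuadrado(lado):
--
--     arte=""
--
--     for i in range(lado):
--
--         if i==0 or i==lado-1:
--             arte+=PASTEL_AZUL+"█"*lado+RESET+"\n"
--
--         else:
--             arte+=PASTEL_AZUL+"█"+RESET+" "*(lado-2)+PASTEL_AZUL+"█"+RESET+"\n"
--
--     return arte
-- ===== SOURCE B (Python) =====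
-- RESET = "\033[0m"
--
-- PASTEL_AZUL = "\033[38;5;153m"
--
-- def generar_cuadrado(lado):
--     if lado <= 0:
--         return ""
--     full = PASTEL_AZUL + "█" * lado + RESET + "\n"
--     if lado == 1:
--         return full
--     mid = PASTEL_AZUL + "█" + RESET + " " * (lado - 2) + PASTEL_AZUL + "█" + RESET + "\n"
--     return full + mid * (lado - 2) + full
-- ===== Notes on version B (the rewrite author's own statement) =====
-- stated objective: simpler
-- what changed: Replaces the per-row loop with a closed-form construction: build the border row and the interior row once, then concatenate border + interior*(lado-2) + border, with early returns for the empty and single-row degenerate sizes.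
import Mathlib
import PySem

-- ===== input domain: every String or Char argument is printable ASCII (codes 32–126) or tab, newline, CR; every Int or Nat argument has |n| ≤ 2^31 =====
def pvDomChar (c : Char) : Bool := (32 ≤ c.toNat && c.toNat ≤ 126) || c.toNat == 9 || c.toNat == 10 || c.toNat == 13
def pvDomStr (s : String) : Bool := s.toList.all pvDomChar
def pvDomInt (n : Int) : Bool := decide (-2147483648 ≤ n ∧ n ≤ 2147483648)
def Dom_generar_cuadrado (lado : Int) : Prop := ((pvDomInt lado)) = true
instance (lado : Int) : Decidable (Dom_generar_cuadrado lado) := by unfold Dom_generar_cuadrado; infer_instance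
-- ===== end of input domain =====

-- B builds the square in closed form (border row, interior row, concatenation) instead of A's per-row loop; same output.

-- ===== PORT A =====
def pvRESET : List Char := "\x1b[0m".toList
def pvPASTEL : List Char := "\x1b[38;5;153m".toList

def generar_cuadrado (lado : Int) : String :=
  String.ofList <|
    (PySem.List.pyRange 0 lado 1).foldl
      (fun arte i =>
        if i = 0 ∨ i = lado - 1 then
          arte ++ (pvPASTEL ++ PySem.List.pyRepeat ['█'] lado ++ pvRESET ++ ['\n'])
        else
          arte ++ (pvPASTEL ++ ['█'] ++ pvRESET ++ PySem.List.pyRepeat [' '] (lado - 2)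
                   ++ pvPASTEL ++ ['█'] ++ pvRESET ++ ['\n']))
      []

-- ===== PORT B =====
def pvFullRow (lado : Int) : List Char :=
  pvPASTEL ++ PySem.List.pyRepeat ['█'] lado ++ pvRESET ++ ['\n']

def pvMidRow (lado : Int) : List Char :=
  pvPASTEL ++ ['█'] ++ pvRESET ++ PySem.List.pyRepeat [' '] (lado - 2)
    ++ pvPASTEL ++ ['█'] ++ pvRESET ++ ['\n']

def generar_cuadrado_alt (lado : Int) : String :=
  if lado ≤ 0 then ""
  else if lado = 1 then String.ofList (pvFullRow lado)
  else String.ofList (pvFullRow lado ++ PySem.List.pyRepeat (pvMidRow lado) (lado - 2) ++ pvFullRow lado)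

-- ===== PRECONDITION & SPEC =====
def Spec_generar_cuadrado (lado : Int) (out : String) : Prop := out = generar_cuadrado_alt lado
instance (lado : Int) (out : String) : Decidable (Spec_generar_cuadrado lado out) := by unfold Spec_generar_cuadrado; infer_instance

-- ===== CLAIM (what is proved, stated in full; the proofs are below) =====
def Claim_equal_generar_cuadrado : Prop := ∀ (lado : Int), Dom_generar_cuadrado lado → Spec_generar_cuadrado lado (generar_cuadrado lado)

-- ===== LEMMAS AND PROOFS =====

-- a fold that appends the same constant chunk for every element = the chunk repeated length-many times
theorem foldl_append_const {α β : Type} (l : List α) (c : List β) (acc : List β) :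
    l.foldl (fun a _ => a ++ c) acc = acc ++ (List.replicate l.length c).flatten := by
  induction l generalizing acc with
  | nil => simp
  | cons x t ih => simp [List.foldl_cons, ih, List.replicate_succ, List.append_assoc]

-- ===== VERDICT =====
theorem generar_cuadrado_spec : Claim_equal_generar_cuadrado := by
  intro lado _
  unfold Spec_generar_cuadrado generar_cuadrado generar_cuadrado_alt
  rcases le_or_gt lado 0 with h0 | h0
  · rw [PySem.List.pyRange_one_eq_nil (by omega)]
    simp [h0]
  rcases eq_or_lt_of_le (by omega : (1:Int) ≤ lado) with h1 | h1
  · subst h1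
    rw [PySem.List.pyRange_one_cons (by omega), PySem.List.pyRange_one_eq_nil (by omega)]
    simp [pvFullRow]
  -- lado ≥ 2: range = [0] ++ middle ++ [lado-1]
  rw [PySem.List.pyRange_one_append 0 (lado - 1) lado (by omega) (by omega),
      PySem.List.pyRange_one_append 0 1 (lado - 1) (by omega) (by omega),
      ]
  have h01 : PySem.List.pyRange 0 1 1 = [0] := by
    rw [PySem.List.pyRange_one_cons (by omega), PySem.List.pyRange_one_eq_nil (by omega)]
  rw [h01]
  have hlast : PySem.List.pyRange (lado - 1) lado 1 = [lado - 1] := by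
    have := PySem.List.pyRange_one_singleton (lado - 1)
    simpa [show lado - 1 + 1 = lado by omega] using this
  rw [hlast]
  simp only [List.foldl_append, List.foldl_cons, List.foldl_nil]
  have hmid :
      (PySem.List.pyRange 1 (lado - 1) 1).foldl
        (fun arte i =>
          if i = 0 ∨ i = lado - 1 then
            arte ++ (pvPASTEL ++ PySem.List.pyRepeat ['█'] lado ++ pvRESET ++ ['\n'])
          else
            arte ++ (pvPASTEL ++ ['█'] ++ pvRESET ++ PySem.List.pyRepeat [' '] (lado - 2)
                     ++ pvPASTEL ++ ['█'] ++ pvRESET ++ ['\n']))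
        (pvPASTEL ++ PySem.List.pyRepeat ['█'] lado ++ pvRESET ++ ['\n'])
      = pvFullRow lado ++ PySem.List.pyRepeat (pvMidRow lado) (lado - 2) := by
    refine (PySem.List.foldl_congr_mem _ _ (fun a (_ : Int) => a ++ pvMidRow lado) _ ?_).trans ?_
    · intro acc x hx
      rw [PySem.List.mem_pyRange_one] at hx
      rw [if_neg (by omega)]
      simp [pvMidRow]
    · rw [foldl_append_const, PySem.List.length_pyRange_one]
      simp [PySem.List.pyRepeat, pvFullRow, show lado - 1 - 1 = lado - 2 by omega]
  simp only [true_or, or_true, if_true, List.nil_append]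
  rw [hmid]
  rw [if_neg (by omega : ¬ lado ≤ 0), if_neg (by omega : ¬ lado = 1)]
  simp [pvFullRow, List.append_assoc]
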